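-- pv_equiv track=rewrite | github.com/chinchi-hsu/SNA2014_Homework3 | preparation/petster_data_preprocessing.py | processSex
-- ===== SOURCE A (Python) =====
-- def processSex(data, sexWord, keptWord):
-- 	sexDict = dict();
-- 	count = 0;
--
-- 	for row in data:
-- 		if row[keptWord]:
-- 			sex = row[sexWord];
--
-- 			if sex not in sexDict:
-- 				sexDict[sex] = count;
-- 				count += 1;
-- 			row[sexWord] = sexDict[sex];
--
-- 	return sexDict;
-- ===== SOURCE B (Python) =====
-- def processSex(data, sexWord, keptWord):
--     # Note: like A, mutates kept rows in place (row[sexWord] -> its index).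
--     kept = [row for row in data if row[keptWord]]
--     sexDict = {s: i for i, s in enumerate(dict.fromkeys(row[sexWord] for row in kept))}
--     for row in kept:
--         row[sexWord] = sexDict[row[sexWord]]
--     return sexDict
-- ===== Notes on version B (the rewrite author's own statement) =====
-- stated objective: simpler
-- what changed: Replaces A's single stateful loop (dict + running counter, conditional insert per row) by a pipeline: filter the kept rows, dedup their original sex values with dict.fromkeys, enumerate that list to build the mapping, then a separate pass rewrites the rows; Pre_ excludes only inputs where A raises KeyError (a row missing keptWord, or a kept row missing sexWord).
import Mathlib
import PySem

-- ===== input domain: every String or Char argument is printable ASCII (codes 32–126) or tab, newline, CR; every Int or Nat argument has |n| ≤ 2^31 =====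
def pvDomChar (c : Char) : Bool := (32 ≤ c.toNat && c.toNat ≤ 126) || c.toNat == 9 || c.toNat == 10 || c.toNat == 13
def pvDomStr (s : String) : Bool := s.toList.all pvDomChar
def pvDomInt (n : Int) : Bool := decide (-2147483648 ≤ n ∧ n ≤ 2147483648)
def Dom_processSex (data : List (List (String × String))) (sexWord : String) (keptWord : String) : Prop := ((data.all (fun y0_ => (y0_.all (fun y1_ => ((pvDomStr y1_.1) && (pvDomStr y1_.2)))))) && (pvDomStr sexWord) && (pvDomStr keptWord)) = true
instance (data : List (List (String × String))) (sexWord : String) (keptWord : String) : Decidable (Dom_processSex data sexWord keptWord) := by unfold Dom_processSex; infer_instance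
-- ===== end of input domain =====

-- B is a filter/dedup/enumerate pipeline instead of A's stateful loop; equivalence is about the
-- RETURN value only (both Pythons also mutate the kept rows identically; not modelled here).
-- row[k] on a dict row (KeyError = none):
def rowGet? (row : List (String × String)) (k : String) : Option String :=
  PySem.Dict.get? (PySem.Dict.mk row) k

-- ===== PORT A =====
-- one loop iteration of A's 'for row in data' (the mutation row[sexWord]=… does not affect the
-- returned sexDict and is not part of the state); KeyError branches (none) are excluded by Pre_
def processSexStep (sexWord keptWord : String)
    (st : PySem.Dict String Int × Int) (row : List (String × String)) :
    PySem.Dict String Int × Int :=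
  match rowGet? row keptWord with
  | none => st
  | some kv =>
    if kv ≠ "" then
      match rowGet? row sexWord with
      | none => st
      | some sex =>
        if (st.1.contains sex) then st else (st.1.insert sex st.2, st.2 + 1)
    else st

def processSex (data : List (List (String × String))) (sexWord : String) (keptWord : String) : List (String × Int) :=
  (data.foldl (processSexStep sexWord keptWord) (PySem.Dict.empty, 0)).1.items

-- ===== PORT B =====
def processSex_alt (data : List (List (String × String))) (sexWord : String) (keptWord : String) : List (String × Int) :=
  let kept := data.filter (fun row => decide ((rowGet? row keptWord).getD "" ≠ ""))
  let sexes := kept.map (fun row => (rowGet? row sexWord).getD "")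
  (PySem.List.enumerate (PySem.List.dedup sexes) 0).map (fun p => (p.2, p.1))

-- ===== PRECONDITION & SPEC =====
-- Pre_ excludes exactly the inputs where A raises KeyError: a row without the keptWord key,
-- or a kept row (truthy keptWord value) without the sexWord key.
def Pre_processSex (data : List (List (String × String))) (sexWord : String) (keptWord : String) : Prop :=
  ∀ row ∈ data, (rowGet? row keptWord).isSome ∧
    ((rowGet? row keptWord).getD "" ≠ "" → (rowGet? row sexWord).isSome)
instance (data : List (List (String × String))) (sexWord : String) (keptWord : String) : Decidable (Pre_processSex data sexWord keptWord) := by unfold Pre_processSex; infer_instance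

def pvWitness_processSex : (List (List (String × String))) × String × String :=
  ([[("sex", "f"), ("kept", "1")], [("sex", "m"), ("kept", "")], [("sex", "f"), ("kept", "y")]], "sex", "kept")

def Spec_processSex (data : List (List (String × String))) (sexWord : String) (keptWord : String) (out : List (String × Int)) : Prop := out = processSex_alt data sexWord keptWord
instance (data : List (List (String × String))) (sexWord : String) (keptWord : String) (out : List (String × Int)) : Decidable (Spec_processSex data sexWord keptWord out) := by unfold Spec_processSex; infer_instance

-- ===== CLAIM (what is proved, stated in full; the proofs are below) =====
def Claim_equal_processSex : Prop := ∀ (data : List (List (String × String))) (sexWord : String) (keptWord : String), Dom_processSex data sexWord keptWord → Pre_processSex data sexWord keptWord → Spec_processSex data sexWord keptWord (processSex data sexWord keptWord)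

-- ===== LEMMAS AND PROOFS =====

-- the elements of l not already in k, in first-occurrence order
def newsOf (k : List String) : List String → List String
  | [] => []
  | s :: t => if s ∈ k then newsOf k t else s :: newsOf (k ++ [s]) t

theorem set_update_eq_append_newsOf (l : List String) :
    ∀ k : PySem.Set String, PySem.Set.update k l = k ++ newsOf k l := by
  induction l with
  | nil => intro k; simp [PySem.Set.update, newsOf]
  | cons s t ih =>
    intro k
    by_cases h : s ∈ k
    · have hadd : PySem.Set.add k s = k := by
        simp [PySem.Set.add, PySem.Set.contains, h]
      simp only [PySem.Set.update, List.foldl_cons, hadd, newsOf, if_pos h]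
      simpa [PySem.Set.update] using ih k
    · have hadd : PySem.Set.add k s = k ++ [s] := by
        simp [PySem.Set.add, PySem.Set.contains, h]
      have ih2 := ih (k ++ [s])
      simp only [PySem.Set.update, List.foldl_cons, hadd, newsOf, if_neg h]
      simp only [PySem.Set.update] at ih2
      rw [ih2]
      simp

theorem dedup_eq_newsOf (l : List String) :
    PySem.List.dedup l = newsOf [] l := by
  have h := set_update_eq_append_newsOf l []
  simpa [PySem.List.dedup_eq_ofList, ← PySem.Set.update_nil_left] using h

-- the core invariant: folding A's inner step over a list of sex values, starting from (d, c),
-- appends exactly the enumerated fresh values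
theorem foldl_inner_items (l : List String) :
    ∀ (d : PySem.Dict String Int) (c : Int),
      (l.foldl (fun (st : PySem.Dict String Int × Int) sex =>
          if st.1.contains sex then st else (st.1.insert sex st.2, st.2 + 1)) (d, c)).1.items
      = d.items ++ (PySem.List.enumerate (newsOf d.keys l) c).map (fun p => (p.2, p.1)) := by
  induction l with
  | nil => intro d c; simp [newsOf]
  | cons s t ih =>
    intro d c
    by_cases h : s ∈ d.keys
    · have hc : d.contains s = true := by
        rw [PySem.Dict.contains_eq_decide_mem_keys]; simpa using h
      simp [List.foldl_cons, hc, newsOf, h, ih]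
    · have hc : d.contains s = false := by
        rw [PySem.Dict.contains_eq_decide_mem_keys]; simpa using h
      have hkeys : (d.insert s c).keys = d.keys ++ [s] :=
        PySem.Dict.keys_insert_of_not_contains _ _ hc
      have hitems : (d.insert s c).items = d.items ++ [(s, c)] :=
        PySem.Dict.items_insert_of_not_contains _ _ hc
      simp only [List.foldl_cons, hc, Bool.false_eq_true, if_neg, not_false_iff]
      rw [ih, hitems, hkeys]
      simp [newsOf, h, PySem.List.enumerate_cons]

-- under Pre_, A's fold over the rows is the inner fold over the kept rows' sex values
theorem foldl_rows_eq_inner (sexWord keptWord : String) (data : List (List (String × String)))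
    (hp : ∀ row ∈ data, (rowGet? row keptWord).isSome ∧
      ((rowGet? row keptWord).getD "" ≠ "" → (rowGet? row sexWord).isSome)) :
    ∀ st : PySem.Dict String Int × Int,
      data.foldl (processSexStep sexWord keptWord) st
      = ((data.filter (fun row => decide ((rowGet? row keptWord).getD "" ≠ ""))).map
          (fun row => (rowGet? row sexWord).getD "")).foldl
          (fun (st : PySem.Dict String Int × Int) sex =>
            if st.1.contains sex then st else (st.1.insert sex st.2, st.2 + 1)) st := by
  induction data with
  | nil => intro st; simp
  | cons row rest ih =>
    intro st
    obtain ⟨h1, h2⟩ := hp row (List.mem_cons_self ..)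
    have ihr := ih (fun r hr => hp r (List.mem_cons_of_mem _ hr))
    obtain ⟨kv, hkv⟩ := Option.isSome_iff_exists.mp h1
    by_cases hk : kv = ""
    · subst hk
      simp [List.foldl_cons, processSexStep, hkv, ihr]
    · obtain ⟨sex, hsex⟩ := Option.isSome_iff_exists.mp (h2 (by simp [hkv, hk]))
      simp [List.foldl_cons, processSexStep, hkv, hk, hsex, ihr]

-- ===== VERDICT (by name: the statement is the Claim_ definition above) =====
theorem processSex_spec : Claim_equal_processSex := by
  intro data sexWord keptWord _hd hpre
  show _ = processSex_alt data sexWord keptWord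
  simp only [processSex, processSex_alt]
  rw [foldl_rows_eq_inner sexWord keptWord data hpre,
    foldl_inner_items, dedup_eq_newsOf]
  simp [PySem.Dict.empty, PySem.Dict.keys]
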